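-- pv_equiv track=rewrite | github.com/AtenVisarut/chatbot-ladda-v2 | scripts/update_missing_columns.py | match_product
-- ===== SOURCE A (Python) =====
-- def match_product(product_name, csv_data):
--     """Match product_name กับ CSV data: exact → strip → partial"""
--     # Exact match
--     if product_name in csv_data:
--         return product_name, csv_data[product_name]
--
--     # Strip match
--     for csv_name, row in csv_data.items():
--         if csv_name.strip() == product_name.strip():
--             return csv_name, row
--
--     # Partial match
--     for csv_name, row in csv_data.items():
--         if csv_name in product_name or product_name in csv_name:
--             return csv_name, row
--
--     return None, None
-- ===== SOURCE B (Python) =====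
-- def match_product(product_name, csv_data):
--     """Score-and-minimise: rank every key with a tier (0 exact, 1 strip-equal, 2 substring),
--     then return the first minimally-ranked candidate (min with key keeps the first)."""
--     target = product_name.strip()
--
--     def tier(k):
--         if k == product_name:
--             return 0
--         if k.strip() == target:
--             return 1
--         if k in product_name or product_name in k:
--             return 2
--         return 3
--
--     cands = [(tier(k), k, row) for k, row in csv_data.items()]
--     cands = [c for c in cands if c[0] < 3]
--     if not cands:
--         return None, None
--     _, k, row = min(cands, key=lambda c: c[0])
--     return k, row
-- ===== Notes on version B (the rewrite author's own statement) =====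
-- stated objective: alternative
-- what changed: Replaces A's three staged early-return scans by a score-and-minimise formulation: every key gets a tier rank (0 exact, 1 strip-equal, 2 substring), and the result is the first candidate of minimal tier, obtained with a single min over the ranked list; B always ranks all keys, trading A's early returns for one uniform formulation.
import Mathlib
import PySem

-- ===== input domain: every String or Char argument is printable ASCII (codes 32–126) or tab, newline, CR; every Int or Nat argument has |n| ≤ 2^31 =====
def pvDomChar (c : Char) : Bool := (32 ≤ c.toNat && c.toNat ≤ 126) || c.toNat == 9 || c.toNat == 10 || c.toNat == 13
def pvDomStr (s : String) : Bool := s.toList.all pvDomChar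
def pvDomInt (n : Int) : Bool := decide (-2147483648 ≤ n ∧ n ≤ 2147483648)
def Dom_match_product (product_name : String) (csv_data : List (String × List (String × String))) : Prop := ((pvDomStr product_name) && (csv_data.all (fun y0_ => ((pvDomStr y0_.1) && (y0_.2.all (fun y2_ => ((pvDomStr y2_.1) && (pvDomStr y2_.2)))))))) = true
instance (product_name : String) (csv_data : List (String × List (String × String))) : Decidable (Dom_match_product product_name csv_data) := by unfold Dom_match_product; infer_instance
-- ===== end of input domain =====

-- B replaces A's three staged early-return scans by ranking every key with a tier and taking the first minimally-ranked candidate; it trades A's early returns for one uniform scan (objective: alternative).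

-- ===== PORT A =====
-- A: exact dict hit, else first strip-equal key (scan 1), else first substring-match key (scan 2).
def match_product (product_name : String) (csv_data : List (String × List (String × String))) : Option String × (Option (List (String × String))) :=
  match csv_data.find? (fun kv => kv.1 == product_name) with
  | some kv => (some product_name, some kv.2)
  | none =>
    match csv_data.find? (fun kv => PySem.Str.strip kv.1 == PySem.Str.strip product_name) with
    | some kv => (some kv.1, some kv.2)
    | none =>
      match csv_data.find? (fun kv => PySem.Str.isIn kv.1 product_name || PySem.Str.isIn product_name kv.1) with
      | some kv => (some kv.1, some kv.2)
      | none => (none, none)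

-- ===== PORT B =====
-- B: rank each key with a tier (0 exact, 1 strip-equal, 2 substring, 3 none), keep tiers < 3,
-- return the first candidate of minimal tier (Python's min with key keeps the first minimum).
def pvTier (product_name target k : String) : Nat :=
  if k == product_name then 0
  else if PySem.Str.strip k == target then 1
  else if PySem.Str.isIn k product_name || PySem.Str.isIn product_name k then 2
  else 3

def match_product_alt (product_name : String) (csv_data : List (String × List (String × String))) : Option String × (Option (List (String × String))) :=
  let target := PySem.Str.strip product_name
  let cands := (csv_data.map (fun kv => (pvTier product_name target kv.1, kv))).filter (fun c => c.1 < 3)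
  match cands with
  | [] => (none, none)
  | c :: rest =>
    let best := rest.foldl (fun b s => if s.1 < b.1 then s else b) c
    (some best.2.1, some best.2.2)

-- ===== PRECONDITION & SPEC =====
def Spec_match_product (product_name : String) (csv_data : List (String × List (String × String))) (out : Option String × (Option (List (String × String)))) : Prop := out = match_product_alt product_name csv_data
instance (product_name : String) (csv_data : List (String × List (String × String))) (out : Option String × (Option (List (String × String)))) : Decidable (Spec_match_product product_name csv_data out) := by unfold Spec_match_product; infer_instance

-- ===== CLAIM (what is proved, stated in full; the proofs are below) =====
def Claim_equal_match_product : Prop := ∀ (product_name : String) (csv_data : List (String × List (String × String))), Dom_match_product product_name csv_data → Spec_match_product product_name csv_data (match_product product_name csv_data)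

-- ===== LEMMAS AND PROOFS =====

-- find? is determined by the predicate's values on the members.
theorem pv_find?_congr {α : Type} (p q : α → Bool) :
    ∀ l : List α, (∀ x ∈ l, p x = q x) → l.find? p = l.find? q := by
  intro l
  induction l with
  | nil => intro _; rfl
  | cons a t ih =>
    intro h
    have ha := h a (List.mem_cons_self ..)
    simp only [List.find?_cons, ha]
    cases q a with
    | true => rfl
    | false => exact ih (fun x hx => h x (List.mem_cons_of_mem _ hx))

-- An accumulator already at the minimum rank is never replaced.
theorem pv_fold_stay {S : Type} (f : S → Nat) (m : Nat) :
    ∀ (l : List S) (c : S), f c = m → (∀ s ∈ l, m ≤ f s) →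
      l.foldl (fun b s => if f s < f b then s else b) c = c := by
  intro l
  induction l with
  | nil => intro c _ _; rfl
  | cons a t ih =>
    intro c hc h
    have ha : ¬ f a < f c := by
      have := h a (List.mem_cons_self ..); omega
    simp only [List.foldl_cons, if_neg ha]
    exact ih c hc (fun s hs => h s (List.mem_cons_of_mem _ hs))

-- The strict-less fold returns the FIRST element attaining the minimum rank m.
theorem pv_fold_min_first {S : Type} (f : S → Nat) (m : Nat) :
    ∀ (l : List S) (c x : S), (∀ s ∈ c :: l, m ≤ f s) →
      (c :: l).find? (fun s => f s == m) = some x →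
      l.foldl (fun b s => if f s < f b then s else b) c = x := by
  intro l
  induction l with
  | nil =>
    intro c x _ hf
    simp only [List.find?_cons] at hf
    cases hfc : (f c == m) with
    | true => simp [hfc] at hf; simp [hf]
    | false => simp [hfc, List.find?] at hf
  | cons a t ih =>
    intro c x hall hf
    have hmc := hall c (List.mem_cons_self ..)
    have hma := hall a (List.mem_cons_of_mem _ (List.mem_cons_self ..))
    simp only [List.find?_cons] at hf
    cases hfc : (f c == m) with
    | true =>
      simp only [hfc] at hf
      have hcx : c = x := by simpa using hf
      have hcm : f c = m := by simpa using hfc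
      subst hcx
      have hna : ¬ f a < f c := by omega
      simp only [List.foldl_cons, if_neg hna]
      exact pv_fold_stay f m t c hcm
        (fun s hs => hall s (List.mem_cons_of_mem _ (List.mem_cons_of_mem _ hs)))
    | false =>
      have hcm : f c ≠ m := by simpa using hfc
      simp only [hfc] at hf
      simp only [List.foldl_cons]
      by_cases hlt : f a < f c
      · rw [if_pos hlt]
        exact ih a x (fun s hs => by
          rcases List.mem_cons.mp hs with h | h
          · subst h; exact hma
          · exact hall s (List.mem_cons_of_mem _ (List.mem_cons_of_mem _ h))) hf
      · rw [if_neg hlt]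
        -- here f a ≠ m too would follow only if find? skipped a; split on it
        cases hfa : (f a == m) with
        | true =>
          -- x = a, but then f a = m ≤ f c and ¬ f a < f c force f c = m, contradiction
          have ham : f a = m := by simpa using hfa
          omega
        | false =>
          simp only [hfa] at hf
          have hf' : (c :: t).find? (fun s => f s == m) = some x := by
            rw [List.find?_cons]; simp [hfc, hf]
          exact ih c x (fun s hs => by
            rcases List.mem_cons.mp hs with h | h
            · subst h; exact hmc
            · exact hall s (List.mem_cons_of_mem _ (List.mem_cons_of_mem _ h))) hf'

-- Membership in B's candidate list comes from a member of csv_data via the rank map.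
theorem pv_mem_cands {pn target : String} {csv : List (String × List (String × String))}
    {s : Nat × String × List (String × String)}
    (hs : s ∈ (csv.map (fun kv => (pvTier pn target kv.1, kv))).filter (fun c => c.1 < 3)) :
    ∃ kv ∈ csv, s = (pvTier pn target kv.1, kv) := by
  have := (List.mem_filter.mp hs).1
  rcases List.mem_map.mp this with ⟨kv, hkv, he⟩
  exact ⟨kv, hkv, he.symm⟩

-- find? over the candidate list for rank m equals find? over csv_data for the corresponding predicate.
theorem pv_find_cands (pn target : String) (csv : List (String × List (String × String))) (m : Nat) (hm : m < 3) :
    ((csv.map (fun kv => (pvTier pn target kv.1, kv))).filter (fun c => c.1 < 3)).find?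
        (fun s => s.1 == m)
      = (csv.find? (fun kv => pvTier pn target kv.1 == m)).map (fun kv => (pvTier pn target kv.1, kv)) := by
  rw [List.find?_filter, List.find?_map]
  refine congrArg _ (pv_find?_congr _ _ csv ?_)
  intro kv _
  simp only [Function.comp]
  cases h : (pvTier pn target kv.1 == m) with
  | true =>
    have ht : pvTier pn target kv.1 = m := by simpa using h
    simp [ht, hm]
  | false => simp

-- ===== VERDICT (by name: the statement is the Claim_ definition above) =====
-- The rank of a key is 0/1/2 exactly when the corresponding tier predicate is the first to hold.
theorem pv_tier_eq0 (pn target k : String) : (pvTier pn target k == 0) = (k == pn) := by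
  unfold pvTier; split_ifs <;> simp_all

theorem pv_tier_eq1 (pn target k : String) (h : (k == pn) = false) :
    (pvTier pn target k == 1) = (PySem.Str.strip k == target) := by
  unfold pvTier; split_ifs <;> simp_all

theorem pv_tier_eq2 (pn target k : String) (h : (k == pn) = false)
    (h1 : (PySem.Str.strip k == target) = false) :
    (pvTier pn target k == 2) = (PySem.Str.isIn k pn || PySem.Str.isIn pn k) := by
  unfold pvTier; split_ifs <;> simp_all

-- Main equivalence: each of A's three stages corresponds to the minimal rank present in B's candidates.
set_option maxHeartbeats 1000000 in
theorem pv_main (pn : String) (csv : List (String × List (String × String))) :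
    match_product pn csv = match_product_alt pn csv := by
  unfold match_product match_product_alt
  simp only []
  set target := PySem.Str.strip pn with htarget
  set g : (String × List (String × String)) → Nat × String × List (String × String) :=
    fun kv => (pvTier pn target kv.1, kv) with hg
  set cands := (csv.map g).filter (fun c => c.1 < 3) with hcands
  cases h0 : csv.find? (fun kv => kv.1 == pn) with
  | some kv =>
    have hkv1 : kv.1 = pn := by have := List.find?_some h0; simpa using this
    have hfind : cands.find? (fun s => s.1 == 0) = some (g kv) := by
      rw [hcands, pv_find_cands pn target csv 0 (by omega)]
      rw [pv_find?_congr _ (fun kv => kv.1 == pn) csv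
        (fun kv _ => pv_tier_eq0 pn target kv.1), h0]; rfl
    rcases hc : cands with _ | ⟨c, rest⟩
    · rw [hc] at hfind; simp [List.find?] at hfind
    · rw [hc] at hfind
      have hbest := pv_fold_min_first (fun s => s.1) 0 rest c (g kv)
        (fun s _ => Nat.zero_le _) hfind
      simp only [hbest, hg, hkv1]
  | none =>
    have h0all : ∀ kv ∈ csv, (kv.1 == pn) = false := by
      intro kv hkv
      have := List.find?_eq_none.mp h0 kv hkv; simpa using this
    have hmem1 : ∀ s ∈ cands, 1 ≤ s.1 := by
      intro s hs
      rcases pv_mem_cands (hcands ▸ hs) with ⟨kv, hkv, rfl⟩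
      have := h0all kv hkv
      unfold pvTier; split_ifs <;> simp_all
    cases h1 : csv.find? (fun kv => PySem.Str.strip kv.1 == PySem.Str.strip pn) with
    | some kv =>
      have hcong : csv.find? (fun kv => pvTier pn target kv.1 == 1)
          = csv.find? (fun kv => PySem.Str.strip kv.1 == target) :=
        pv_find?_congr _ _ csv (fun kv hkv => pv_tier_eq1 pn target kv.1 (h0all kv hkv))
      have hfind : cands.find? (fun s => s.1 == 1) = some (g kv) := by
        rw [hcands, pv_find_cands pn target csv 1 (by omega), hcong, htarget, h1]; rfl
      rcases hc : cands with _ | ⟨c, rest⟩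
      · rw [hc] at hfind; simp [List.find?] at hfind
      · rw [hc] at hfind
        have hbest := pv_fold_min_first (fun s => s.1) 1 rest c (g kv)
          (fun s hs => hmem1 s (hc ▸ hs)) hfind
        simp only [hbest, hg]
    | none =>
      have h1all : ∀ kv ∈ csv, (PySem.Str.strip kv.1 == target) = false := by
        intro kv hkv
        have := List.find?_eq_none.mp h1 kv hkv
        rw [htarget]; simpa using this
      have hmem2 : ∀ s ∈ cands, 2 ≤ s.1 := by
        intro s hs
        rcases pv_mem_cands (hcands ▸ hs) with ⟨kv, hkv, rfl⟩
        have := h0all kv hkv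
        have := h1all kv hkv
        unfold pvTier; split_ifs <;> simp_all
      cases h2 : csv.find? (fun kv => PySem.Str.isIn kv.1 pn || PySem.Str.isIn pn kv.1) with
      | some kv =>
        have hfind : cands.find? (fun s => s.1 == 2) = some (g kv) := by
          rw [hcands, pv_find_cands pn target csv 2 (by omega)]
          rw [pv_find?_congr _ (fun kv => PySem.Str.isIn kv.1 pn || PySem.Str.isIn pn kv.1) csv
            (fun kv hkv => pv_tier_eq2 pn target kv.1 (h0all kv hkv) (h1all kv hkv))]
          rw [h2]; rfl
        rcases hc : cands with _ | ⟨c, rest⟩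
        · rw [hc] at hfind; simp [List.find?] at hfind
        · rw [hc] at hfind
          have hbest := pv_fold_min_first (fun s => s.1) 2 rest c (g kv)
            (fun s hs => hmem2 s (hc ▸ hs)) hfind
          simp only [hbest, hg]
      | none =>
        have h2all : ∀ kv ∈ csv, (PySem.Str.isIn kv.1 pn || PySem.Str.isIn pn kv.1) = false := by
          intro kv hkv
          have := List.find?_eq_none.mp h2 kv hkv; simpa using this
        have hnil : cands = [] := by
          rw [hcands]
          rw [List.filter_eq_nil_iff]
          intro c hc
          rcases List.mem_map.mp hc with ⟨kv, hkv, rfl⟩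
          have e0 := h0all kv hkv
          have e1 := h1all kv hkv
          have e2 := h2all kv hkv
          simp only [hg, decide_eq_true_eq]
          unfold pvTier; split_ifs <;> simp_all
        rw [hnil]

-- ===== VERDICT (by name: the statement is the Claim_ definition above) =====
theorem match_product_spec : Claim_equal_match_product := by
  intro pn csv _
  exact pv_main pn csv
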